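-- pv_equiv track=rewrite | github.com/epibook/epibook.github.io | static/python/snake_string.py | snake_string
-- ===== SOURCE A (Python) =====
-- def snake_string(s):
--     result = []
--     # Outputs the first row, i.e., s[1], s[5], s[9], ...
--     for i in range(1, len(s), 4):
--         result.append(s[i])
--     # Outputs the second row, i.e., s[0], s[2], s[4], ...
--     for i in range(0, len(s), 2):
--         result.append(s[i])
--     # Outputs the third row, i.e., s[3], s[7], s[11], ...
--     for i in range(3, len(s), 4):
--         result.append(s[i])
--     return ''.join(result)
-- ===== SOURCE B (Python) =====
-- def snake_string(s):
--     top, middle, bottom = [], [], []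
--     for i, c in enumerate(s):
--         if i % 4 == 1:
--             top.append(c)
--         elif i % 4 == 3:
--             bottom.append(c)
--         else:
--             middle.append(c)
--     return ''.join(top + middle + bottom)
-- ===== Notes on version B (the rewrite author's own statement) =====
-- stated objective: idiomatic
-- what changed: Replaces A's three strided range loops over indices (re-indexing the string three times) with a single enumerate pass that buckets each character into top/middle/bottom by i % 4, then concatenates the three buckets.
import Mathlib
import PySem

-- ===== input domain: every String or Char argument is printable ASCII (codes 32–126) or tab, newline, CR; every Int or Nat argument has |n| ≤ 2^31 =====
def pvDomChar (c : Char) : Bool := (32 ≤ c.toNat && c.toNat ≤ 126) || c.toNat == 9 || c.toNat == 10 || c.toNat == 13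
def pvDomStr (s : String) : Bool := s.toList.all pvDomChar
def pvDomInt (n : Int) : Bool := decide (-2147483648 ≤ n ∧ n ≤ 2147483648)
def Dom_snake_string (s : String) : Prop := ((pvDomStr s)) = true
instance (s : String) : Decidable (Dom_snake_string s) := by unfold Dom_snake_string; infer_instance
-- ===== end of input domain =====

-- B replaces A's three strided range loops with one enumerate pass bucketing characters by i % 4 (idiomatic single-pass decomposition; same O(n) cost).

-- ===== PORT A =====
def snake_string (s : String) : String :=
  let cs := s.toList
  let result : List Char := []
  -- for i in range(1, len(s), 4): result.append(s[i])
  let result := (PySem.List.pyRange 1 (cs.length : Int) 4).foldl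
    (fun acc i => acc ++ [PySem.List.pyGetD cs i ' ']) result
  -- for i in range(0, len(s), 2): result.append(s[i])
  let result := (PySem.List.pyRange 0 (cs.length : Int) 2).foldl
    (fun acc i => acc ++ [PySem.List.pyGetD cs i ' ']) result
  -- for i in range(3, len(s), 4): result.append(s[i])
  let result := (PySem.List.pyRange 3 (cs.length : Int) 4).foldl
    (fun acc i => acc ++ [PySem.List.pyGetD cs i ' ']) result
  String.ofList result

-- ===== PORT B =====
-- one loop step of Source B: bucket (i, c) into (top, middle, bottom) by i % 4
def snakeStep (acc : List Char × List Char × List Char) (p : Int × Char) :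
    List Char × List Char × List Char :=
  if PySem.Int.mod p.1 4 = 1 then (acc.1 ++ [p.2], acc.2.1, acc.2.2)
  else if PySem.Int.mod p.1 4 = 3 then (acc.1, acc.2.1, acc.2.2 ++ [p.2])
  else (acc.1, acc.2.1 ++ [p.2], acc.2.2)

def snake_string_alt (s : String) : String :=
  let r := (PySem.List.enumerate s.toList 0).foldl snakeStep ([], [], [])
  String.ofList (r.1 ++ r.2.1 ++ r.2.2)

-- ===== PRECONDITION & SPEC =====
def Spec_snake_string (s : String) (out : String) : Prop := out = snake_string_alt s
instance (s : String) (out : String) : Decidable (Spec_snake_string s out) := by unfold Spec_snake_string; infer_instance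

-- ===== CLAIM (what is proved, stated in full; the proofs are below) =====
def Claim_equal_snake_string : Prop := ∀ (s : String), Dom_snake_string s → Spec_snake_string s (snake_string s)

-- ===== LEMMAS AND PROOFS =====

-- the three rows, described as filters of the index range
def rowT (cs : List Char) : List Char :=
  ((List.range cs.length).filter (fun j => decide (j % 4 = 1))).map (fun j => cs.getD j ' ')
def rowM (cs : List Char) : List Char :=
  ((List.range cs.length).filter (fun j => decide (j % 4 ≠ 1 ∧ j % 4 ≠ 3))).map (fun j => cs.getD j ' ')
def rowB (cs : List Char) : List Char :=
  ((List.range cs.length).filter (fun j => decide (j % 4 = 3))).map (fun j => cs.getD j ' ')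

lemma hmod4 (a : Int) : PySem.Int.mod a 4 = a % 4 :=
  PySem.Int.mod_eq_emod_of_pos (by norm_num)

lemma pmod (k r : Nat) : PySem.Int.mod (k : Int) 4 = (r : Int) ↔ k % 4 = r := by
  rw [hmod4]
  omega

-- B's fold characterised: each bucket is a filter of the enumerated list
lemma bfold (xs : List (Int × Char)) : ∀ (t m b : List Char),
    xs.foldl snakeStep (t, m, b) =
      (t ++ (xs.filter (fun p => decide (PySem.Int.mod p.1 4 = 1))).map Prod.snd,
       m ++ (xs.filter (fun p => decide (PySem.Int.mod p.1 4 ≠ 1 ∧ PySem.Int.mod p.1 4 ≠ 3))).map Prod.snd,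
       b ++ (xs.filter (fun p => decide (PySem.Int.mod p.1 4 = 3))).map Prod.snd) := by
  induction xs with
  | nil => intro t m b; simp
  | cons p xs ih =>
    intro t m b
    obtain ⟨i, c⟩ := p
    by_cases h1 : i % 4 = 1
    · simp [snakeStep, h1, ih]
    · by_cases h3 : i % 4 = 3
      · simp [snakeStep, h3, ih]
      · simp [snakeStep, h1, h3, ih]

lemma filter1 (m : Nat) :
    (List.range m).filter (fun j => decide (j % 4 = 1)) =
      (List.range ((m + 2) / 4)).map (fun k => 1 + 4 * k) := by
  induction m with
  | zero => simp
  | succ m ih =>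
    rw [List.range_succ, List.filter_append, ih]
    by_cases h : m % 4 = 1
    · have hc : (m + 1 + 2) / 4 = (m + 2) / 4 + 1 := by omega
      have hv : 1 + 4 * ((m + 2) / 4) = m := by omega
      simp [h, hc, List.range_succ, hv]
    · have hc : (m + 1 + 2) / 4 = (m + 2) / 4 := by omega
      simp [h, hc]

lemma filter2 (m : Nat) :
    (List.range m).filter (fun j => decide (j % 4 ≠ 1 ∧ j % 4 ≠ 3)) =
      (List.range ((m + 1) / 2)).map (fun k => 0 + 2 * k) := by
  induction m with
  | zero => simp
  | succ m ih =>
    rw [List.range_succ, List.filter_append, ih]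
    by_cases h : m % 2 = 0
    · have h1 : m % 4 ≠ 1 := by omega
      have h3 : m % 4 ≠ 3 := by omega
      have hc : (m + 1 + 1) / 2 = (m + 1) / 2 + 1 := by omega
      simp [h1, h3, hc, List.range_succ]
      omega
    · have h13 : m % 4 = 1 ∨ m % 4 = 3 := by omega
      have hc : (m + 1 + 1) / 2 = (m + 1) / 2 := by omega
      rcases h13 with h1 | h3
      · simp [h1, hc]
      · simp [h3, hc]

lemma filter3 (m : Nat) :
    (List.range m).filter (fun j => decide (j % 4 = 3)) =
      (List.range (m / 4)).map (fun k => 3 + 4 * k) := by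
  induction m with
  | zero => simp
  | succ m ih =>
    rw [List.range_succ, List.filter_append, ih]
    by_cases h : m % 4 = 3
    · have hc : (m + 1) / 4 = m / 4 + 1 := by omega
      have hv : 3 + 4 * (m / 4) = m := by omega
      simp [h, hc, List.range_succ, hv]
    · have hc : (m + 1) / 4 = m / 4 := by omega
      simp [h, hc]

-- A's strided range maps, rewritten as filtered index ranges
lemma rowA1 (cs : List Char) :
    (PySem.List.pyRange 1 (cs.length : Int) 4).map (fun i => PySem.List.pyGetD cs i ' ') =
      rowT cs := by
  rw [rowT, PySem.List.pyRange_of_pos 1 (cs.length : Int) (s := 4) (by norm_num), filter1,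
    List.map_map, List.map_map]
  have hC : (if (1 : Int) < (cs.length : Int)
      then (((cs.length : Int) - 1 + 4 - 1) / 4).toNat else 0) = (cs.length + 2) / 4 := by
    split_ifs with h <;> omega
  rw [hC]
  refine List.map_congr_left (fun k _ => ?_)
  have h := PySem.List.pyGetD_natCast cs (1 + 4 * k) ' '
  push_cast at h
  simp [Function.comp, h, List.getD]

lemma rowA2 (cs : List Char) :
    (PySem.List.pyRange 0 (cs.length : Int) 2).map (fun i => PySem.List.pyGetD cs i ' ') =
      rowM cs := by
  rw [rowM, PySem.List.pyRange_of_pos 0 (cs.length : Int) (s := 2) (by norm_num), filter2,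
    List.map_map, List.map_map]
  have hC : (if (0 : Int) < (cs.length : Int)
      then (((cs.length : Int) - 0 + 2 - 1) / 2).toNat else 0) = (cs.length + 1) / 2 := by
    split_ifs with h <;> omega
  rw [hC]
  refine List.map_congr_left (fun k _ => ?_)
  have h := PySem.List.pyGetD_natCast cs (2 * k) ' '
  push_cast at h
  simp [Function.comp, h, List.getD]

lemma rowA3 (cs : List Char) :
    (PySem.List.pyRange 3 (cs.length : Int) 4).map (fun i => PySem.List.pyGetD cs i ' ') =
      rowB cs := by
  rw [rowB, PySem.List.pyRange_of_pos 3 (cs.length : Int) (s := 4) (by norm_num), filter3,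
    List.map_map, List.map_map]
  have hC : (if (3 : Int) < (cs.length : Int)
      then (((cs.length : Int) - 3 + 4 - 1) / 4).toNat else 0) = cs.length / 4 := by
    split_ifs with h <;> omega
  rw [hC]
  refine List.map_congr_left (fun k _ => ?_)
  have h := PySem.List.pyGetD_natCast cs (3 + 4 * k) ' '
  push_cast at h
  simp [Function.comp, h, List.getD]

set_option maxRecDepth 8192 in
lemma Aeq (s : String) :
    snake_string s = String.ofList (rowT s.toList ++ rowM s.toList ++ rowB s.toList) := by
  unfold snake_string
  simp only [PySem.List.foldl_append_singleton_eq_map, List.nil_append]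
  rw [rowA1, rowA2, rowA3]

-- B's buckets equal the three rows
lemma bRow1 (cs : List Char) :
    ((List.range cs.length).filter
        ((fun p => decide (PySem.Int.mod p.1 4 = 1)) ∘ fun k : Nat => ((k : Int), cs.getD k ' '))).map
      (Prod.snd ∘ fun k : Nat => ((k : Int), cs.getD k ' ')) = rowT cs := by
  have hp : ((fun p => decide (PySem.Int.mod p.1 4 = 1)) ∘ fun k : Nat => ((k : Int), cs.getD k ' ')) =
      (fun j : Nat => decide (j % 4 = 1)) := by
    funext k
    simp only [Function.comp]
    exact decide_eq_decide.mpr (pmod k 1)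
  have hs : (Prod.snd ∘ fun k : Nat => ((k : Int), cs.getD k ' ')) =
      (fun j : Nat => cs.getD j ' ') := by
    funext k; rfl
  rw [hp, hs, rowT]

lemma bRow2 (cs : List Char) :
    ((List.range cs.length).filter
        ((fun p => decide (PySem.Int.mod p.1 4 ≠ 1 ∧ PySem.Int.mod p.1 4 ≠ 3)) ∘
          fun k : Nat => ((k : Int), cs.getD k ' '))).map
      (Prod.snd ∘ fun k : Nat => ((k : Int), cs.getD k ' ')) = rowM cs := by
  have hp : ((fun p => decide (PySem.Int.mod p.1 4 ≠ 1 ∧ PySem.Int.mod p.1 4 ≠ 3)) ∘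
        fun k : Nat => ((k : Int), cs.getD k ' ')) =
      (fun j : Nat => decide (j % 4 ≠ 1 ∧ j % 4 ≠ 3)) := by
    funext k
    simp only [Function.comp]
    refine decide_eq_decide.mpr ?_
    constructor
    · rintro ⟨h1, h3⟩; exact ⟨fun h => h1 ((pmod k 1).mpr h), fun h => h3 ((pmod k 3).mpr h)⟩
    · rintro ⟨h1, h3⟩; exact ⟨fun h => h1 ((pmod k 1).mp h), fun h => h3 ((pmod k 3).mp h)⟩
  have hs : (Prod.snd ∘ fun k : Nat => ((k : Int), cs.getD k ' ')) =
      (fun j : Nat => cs.getD j ' ') := by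
    funext k; rfl
  rw [hp, hs, rowM]

lemma bRow3 (cs : List Char) :
    ((List.range cs.length).filter
        ((fun p => decide (PySem.Int.mod p.1 4 = 3)) ∘ fun k : Nat => ((k : Int), cs.getD k ' '))).map
      (Prod.snd ∘ fun k : Nat => ((k : Int), cs.getD k ' ')) = rowB cs := by
  have hp : ((fun p => decide (PySem.Int.mod p.1 4 = 3)) ∘ fun k : Nat => ((k : Int), cs.getD k ' ')) =
      (fun j : Nat => decide (j % 4 = 3)) := by
    funext k
    simp only [Function.comp]
    exact decide_eq_decide.mpr (pmod k 3)
  have hs : (Prod.snd ∘ fun k : Nat => ((k : Int), cs.getD k ' ')) =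
      (fun j : Nat => cs.getD j ' ') := by
    funext k; rfl
  rw [hp, hs, rowB]

set_option maxRecDepth 8192 in
lemma Beq (s : String) :
    snake_string_alt s = String.ofList (rowT s.toList ++ rowM s.toList ++ rowB s.toList) := by
  unfold snake_string_alt
  rw [bfold]
  simp only [List.nil_append]
  rw [PySem.List.enumerate_eq_map_pyRange s.toList ' ', PySem.List.len_eq,
    PySem.List.pyRange_zero_nat, List.map_map]
  have hg : ((fun j => (j, PySem.List.pyGetD s.toList j ' ')) ∘ fun k : Nat => (k : Int)) =
      (fun k : Nat => ((k : Int), s.toList.getD k ' ')) := by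
    funext k
    simp [PySem.List.pyGetD_natCast]
  rw [hg, List.filter_map, List.filter_map, List.filter_map, List.map_map, List.map_map,
    List.map_map, bRow1 s.toList, bRow2 s.toList, bRow3 s.toList]

-- ===== VERDICT (by name: the statement is the Claim_ definition above) =====
theorem snake_string_spec : Claim_equal_snake_string := by
  intro s _
  unfold Spec_snake_string
  rw [Aeq s, Beq s]
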